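-- pv_equiv track=rewrite | github.com/qed4950-web/AI-summary | infopilot.py | _pick_value
-- ===== SOURCE A (Python) =====
-- from typing import Any, Dict, List, Optional, Set, Tuple
--
-- def _normalize_key(name: str) -> str:
--     """Normalize header names by stripping non-alphanumerics and lowering case."""
--     return "".join(ch for ch in (name or "").lower() if ch.isalnum())
--
-- def _pick_value(row: Dict[str, str], aliases) -> str:
--     normalized = {_normalize_key(k): (k, v) for k, v in row.items() if k}
--     for alias in aliases:
--         alias_norm = _normalize_key(alias)
--         data = normalized.get(alias_norm)
--         if data:
--             value = (data[1] or "").strip()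
--             if value:
--                 return value
--     return ""
-- ===== SOURCE B (Python) =====
-- def _normalize_key(name: str) -> str:
--     return "".join(ch for ch in (name or "").lower() if ch.isalnum())
--
-- def _pick_value(row, aliases) -> str:
--     # Inverted traversal: one pass over the row fills an alias-indexed slot table
--     # (last row match wins per slot), then the slots are scanned in alias order.
--     slots = [(_normalize_key(a), None) for a in aliases]
--     for k, v in row.items():
--         if not k:
--             continue
--         nk = _normalize_key(k)
--         slots = [(na, v if na == nk else cur) for na, cur in slots]
--     for _, cur in slots:
--         if cur is not None:
--             s = cur.strip()
--             if s:
--                 return s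
--     return ""
-- ===== Notes on version B (the rewrite author's own statement) =====
-- stated objective: alternative
-- what changed: B inverts the traversal: instead of building a normalized-key dict and looking each alias up, it makes one pass over the row filling an alias-indexed slot table (last row match wins per slot) and then scans the slots in alias order for the first non-empty stripped value.
import Mathlib
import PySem

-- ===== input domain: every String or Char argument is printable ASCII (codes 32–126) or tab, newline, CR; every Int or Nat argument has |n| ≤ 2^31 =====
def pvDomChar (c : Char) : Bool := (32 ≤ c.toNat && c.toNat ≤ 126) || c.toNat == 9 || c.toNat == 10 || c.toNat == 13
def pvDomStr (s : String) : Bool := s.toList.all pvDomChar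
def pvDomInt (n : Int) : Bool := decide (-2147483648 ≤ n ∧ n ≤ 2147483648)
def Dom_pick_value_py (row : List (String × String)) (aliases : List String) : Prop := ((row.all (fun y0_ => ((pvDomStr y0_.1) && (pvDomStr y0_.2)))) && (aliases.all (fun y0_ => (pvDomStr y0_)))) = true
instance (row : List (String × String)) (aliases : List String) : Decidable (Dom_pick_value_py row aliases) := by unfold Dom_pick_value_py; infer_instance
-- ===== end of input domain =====

-- B inverts the traversal: one pass over the row fills an alias-indexed slot table (last row
-- match wins), then the slots are scanned in alias order (objective: alternative — no dict).

-- ===== PORT A =====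
-- _normalize_key: lower then keep only alphanumeric characters (shared helper of both Pythons)
def normalize_key_py (name : String) : String :=
  String.ofList ((PySem.Str.lower name).toList.filter PySem.Chars.isalnum)

-- the 'for alias in aliases' loop of A
def pickA_loop (normalized : PySem.Dict String (String × String)) : List String → String
  | [] => ""
  | al :: rest =>
    match normalized.get? (normalize_key_py al) with
    | some data =>
        -- value = (data[1] or "").strip()
        let value := PySem.Str.strip (if data.2 = "" then "" else data.2)
        if value ≠ "" then value else pickA_loop normalized rest
    | none => pickA_loop normalized rest

def pick_value_py (row : List (String × String)) (aliases : List String) : String :=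
  let normalized : PySem.Dict String (String × String) :=
    row.foldl (fun d kv => if kv.1 ≠ "" then d.insert (normalize_key_py kv.1) kv else d)
      PySem.Dict.empty
  pickA_loop normalized aliases

-- ===== PORT B =====
-- second loop of B: scan the slot table in alias order
def pickB_scan : List (String × Option String) → String
  | [] => ""
  | (_, none) :: rest => pickB_scan rest
  | (_, some v) :: rest =>
      let s := PySem.Str.strip v
      if s ≠ "" then s else pickB_scan rest

def pick_value_py_alt (row : List (String × String)) (aliases : List String) : String :=
  -- slots = [(_normalize_key(a), None) for a in aliases]
  let slots0 : List (String × Option String) :=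
    aliases.map (fun a => (normalize_key_py a, none))
  -- for k, v in row.items(): if not k: continue; slots = [(na, v if na == nk else cur) …]
  let slots :=
    row.foldl (fun sl kv =>
      if kv.1 = "" then sl
      else
        let nk := normalize_key_py kv.1
        sl.map (fun p => (p.1, if p.1 = nk then some kv.2 else p.2))) slots0
  pickB_scan slots

-- ===== PRECONDITION & SPEC =====
def Spec_pick_value_py (row : List (String × String)) (aliases : List String) (out : String) : Prop := out = pick_value_py_alt row aliases
instance (row : List (String × String)) (aliases : List String) (out : String) : Decidable (Spec_pick_value_py row aliases out) := by unfold Spec_pick_value_py; infer_instance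

-- ===== CLAIM (what is proved, stated in full; the proofs are below) =====
def Claim_equal_pick_value_py : Prop := ∀ (row : List (String × String)) (aliases : List String), Dom_pick_value_py row aliases → Spec_pick_value_py row aliases (pick_value_py row aliases)

-- ===== LEMMAS AND PROOFS =====

-- last-wins scan of the row for one target, keeping the value only
def lastVal (row : List (String × String)) (target : String) (o : Option String) : Option String :=
  row.foldl (fun acc kv =>
    if kv.1 ≠ "" ∧ normalize_key_py kv.1 = target then some kv.2 else acc) o

-- per-slot step of B's row pass
def slotStep (kv : String × String) (p : String × Option String) : String × Option String :=
  if kv.1 = "" then p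
  else (p.1, if p.1 = normalize_key_py kv.1 then some kv.2 else p.2)

-- B's whole-table row pass acts pointwise: it is the map of the per-slot fold
theorem foldl_map_comm (row : List (String × String)) (sl : List (String × Option String)) :
    row.foldl (fun sl kv =>
      if kv.1 = "" then sl
      else sl.map (fun p => (p.1, if p.1 = normalize_key_py kv.1 then some kv.2 else p.2))) sl
    = sl.map (fun p => row.foldl (fun p kv => slotStep kv p) p) := by
  induction row generalizing sl with
  | nil => simp
  | cons kv rest ih =>
    simp only [List.foldl_cons]
    by_cases h : kv.1 = ""
    · rw [if_pos h, ih]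
      apply List.map_congr_left; intro p _
      simp [slotStep, h]
    · rw [if_neg h, ih, List.map_map]
      apply List.map_congr_left; intro p _
      simp [Function.comp, slotStep, h]

-- the per-slot fold keeps the key and computes the last-wins value
theorem slot_fold_char (row : List (String × String)) (na : String) (o : Option String) :
    row.foldl (fun p kv => slotStep kv p) (na, o) = (na, lastVal row na o) := by
  induction row generalizing o with
  | nil => rfl
  | cons kv rest ih =>
    rw [List.foldl_cons]
    have hs : slotStep kv (na, o)
        = (na, if kv.1 ≠ "" ∧ normalize_key_py kv.1 = na then some kv.2 else o) := by
      by_cases h : kv.1 = ""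
      · simp [slotStep, h]
      · simp only [slotStep, if_neg h]
        by_cases he : na = normalize_key_py kv.1
        · rw [if_pos he, if_pos ⟨h, he.symm⟩]
        · rw [if_neg he, if_neg (fun hh => he hh.2.symm)]
    rw [hs, ih]
    simp only [lastVal, List.foldl_cons]

-- lookup in A's fold-built dict = last-wins scan of the row keeping the whole (k, v) pair
theorem get_foldA (row : List (String × String)) (d : PySem.Dict String (String × String))
    (target : String) :
    (row.foldl (fun d kv => if kv.1 ≠ "" then d.insert (normalize_key_py kv.1) kv else d) d).get?
        target
      = row.foldl (fun acc kv =>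
          if kv.1 ≠ "" ∧ normalize_key_py kv.1 = target then some kv else acc) (d.get? target) := by
  induction row generalizing d with
  | nil => rfl
  | cons kv rest ih =>
    simp only [List.foldl_cons]
    by_cases h : kv.1 = ""
    · rw [if_neg (by simp [h]), ih, if_neg (by simp [h])]
    · rw [if_pos (by simp [h]), ih, PySem.Dict.get?_insert]
      by_cases he : normalize_key_py kv.1 = target
      · rw [if_pos he.symm, if_pos ⟨h, he⟩]
      · rw [if_neg (fun hh => he hh.symm), if_neg (fun hh => he hh.2)]

-- lastVal is the snd-projection of the pair-keeping scan
theorem lastVal_eq_map (row : List (String × String)) (target : String)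
    (o : Option (String × String)) :
    lastVal row target (o.map Prod.snd)
      = (row.foldl (fun acc kv =>
          if kv.1 ≠ "" ∧ normalize_key_py kv.1 = target then some kv else acc) o).map Prod.snd := by
  induction row generalizing o with
  | nil => rfl
  | cons kv rest ih =>
    simp only [lastVal, List.foldl_cons] at *
    by_cases h : kv.1 ≠ "" ∧ normalize_key_py kv.1 = target
    · rw [if_pos h, if_pos h, ← ih]; rfl
    · rw [if_neg h, if_neg h, ih]

theorem pick_eq (row : List (String × String)) (aliases : List String) :
    pick_value_py row aliases = pick_value_py_alt row aliases := by
  unfold pick_value_py pick_value_py_alt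
  dsimp only
  rw [foldl_map_comm, List.map_map]
  induction aliases with
  | nil => rfl
  | cons al rest ih =>
    rw [List.map_cons, Function.comp_apply, slot_fold_char, pickA_loop, get_foldA]
    have hlv : lastVal row (normalize_key_py al) none
        = (row.foldl (fun acc kv =>
            if kv.1 ≠ "" ∧ normalize_key_py kv.1 = normalize_key_py al then some kv else acc)
          (none : Option (String × String))).map Prod.snd := by
      rw [← lastVal_eq_map]; rfl
    rw [PySem.Dict.get?_empty, hlv]
    cases row.foldl (fun acc kv =>
        if kv.1 ≠ "" ∧ normalize_key_py kv.1 = normalize_key_py al then some kv else acc)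
      (none : Option (String × String)) with
    | none => simpa [pickB_scan] using ih
    | some data =>
      simp only [Option.map_some, pickB_scan]
      have hv : PySem.Str.strip (if data.2 = "" then "" else data.2) = PySem.Str.strip data.2 := by
        by_cases h2 : data.2 = "" <;> simp [h2]
      rw [hv]
      split_ifs <;> simp_all

-- ===== VERDICT (by name: the statement is the Claim_ definition above) =====
theorem pick_value_py_spec : Claim_equal_pick_value_py := by
  intro row aliases _
  unfold Spec_pick_value_py
  exact pick_eq row aliases
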